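-- pv_equiv track=rewrite | github.com/andalenavals/Un_courses_and_projects | challenge/google/3/queue-to-do/queue-to-do.py | solutionc
-- ===== SOURCE A (Python) =====
-- def solutionc(start,length):
--     if start%2==0:
--         if length%2==0:
--             if length%4==0: r=0
--             else: r=1
--             inum=(length-1)*2
--             for i in range(length//2):
--                 r^=inum*(i+1)+start
--         else:
--             if (length-1)%4==0: r=0
--             else: r=1
--             inum=length-1
--             for i in range(length):
--                 r^=inum*(i+1)+start
--             for i in range(length//2):
--                 r^=length*(2*i+1)+start
--     else:
--         r=0
--         if length%2==0:
--             inum=length-1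
--             for i in range(length):
--                 r^=length*(i)+start
--             for i in range(length//2):
--                 r^=inum*(2*i+1)+start
--         else:
--             for i in range((length+1)//2):
--                 r^=length*2*i+start
--     return r
-- ===== SOURCE B (Python) =====
-- def _prefix(n):
--     # XOR of all integers in range(0, n), n >= 0, in O(1)
--     m = n % 4
--     if m == 0:
--         return 0
--     if m == 1:
--         return n - 1
--     if m == 2:
--         return 1
--     return n
--
-- def _neg_prefix(m):
--     # XOR of all integers in range(-m, 0), m >= 0, in O(1)
--     return _prefix(m) if m % 2 == 0 else ~_prefix(m)
--
-- def _range_xor(a, b):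
--     # XOR of all integers in range(a, b), a <= b, in O(1)
--     if a >= 0:
--         return _prefix(a) ^ _prefix(b)
--     if b <= 0:
--         return _neg_prefix(-a) ^ _neg_prefix(-b)
--     return _neg_prefix(-a) ^ _prefix(b)
--
-- def solutionc(start, length):
--     # XOR checksum of the triangular grid: row i (0 <= i < length) holds the
--     # consecutive values start+i*length .. start+i*length+(length-i)-1; each
--     # row is folded in via the O(1) closed form for the XOR of a range.
--     if length <= 0:
--         return 0
--     r = 0
--     for i in range(length):
--         lo = start + i * length
--         r ^= _range_xor(lo, lo + length - i)
--     return r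
-- ===== Notes on version B (the rewrite author's own statement) =====
-- stated objective: alternative
-- what changed: B computes the checksum as the XOR of the grid's rows, folding each row in with the O(1) closed form for the XOR of a consecutive integer range (prefix-XOR mod-4 pattern, extended to negative ranges by complementation), replacing A's four-way parity case analysis with hand-derived pair-cancellation loops.
-- intended difference: On non-positive length with even start and length%4 in {2,3} (an empty grid), A returns 1 -- its loops never run and the leftover parity-initialised accumulator escapes -- while B returns 0, the XOR of an empty grid, which is the intended checksum. — e.g. on solutionc(0, -2): A returns 1, B returns 0
import Mathlib
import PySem

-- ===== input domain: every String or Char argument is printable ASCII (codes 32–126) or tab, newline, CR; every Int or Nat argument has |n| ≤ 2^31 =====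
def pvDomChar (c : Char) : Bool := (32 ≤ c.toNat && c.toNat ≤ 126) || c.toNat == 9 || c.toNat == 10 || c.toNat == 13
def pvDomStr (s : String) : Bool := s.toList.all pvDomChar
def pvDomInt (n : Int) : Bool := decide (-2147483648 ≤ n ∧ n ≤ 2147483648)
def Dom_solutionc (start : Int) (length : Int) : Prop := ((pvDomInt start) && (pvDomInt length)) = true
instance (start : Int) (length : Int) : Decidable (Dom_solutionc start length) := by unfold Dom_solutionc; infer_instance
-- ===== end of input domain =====

-- B replaces A's four-way parity case analysis by the classic row-wise checksum:
-- the XOR of each row's consecutive range, folded in via the O(1) prefix-XOR closed form.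

-- ===== PORT A =====
def solutionc (start : Int) (length : Int) : Int :=
  if PySem.Int.mod start 2 = 0 then
    if PySem.Int.mod length 2 = 0 then
      let r : Int := if PySem.Int.mod length 4 = 0 then 0 else 1
      let inum := (length - 1) * 2
      (PySem.List.pyRange 0 (PySem.Int.floordiv length 2) 1).foldl
        (fun r i => PySem.Int.bxor r (inum * (i + 1) + start)) r
    else
      let r : Int := if PySem.Int.mod (length - 1) 4 = 0 then 0 else 1
      let inum := length - 1
      let r := (PySem.List.pyRange 0 length 1).foldl
        (fun r i => PySem.Int.bxor r (inum * (i + 1) + start)) r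
      (PySem.List.pyRange 0 (PySem.Int.floordiv length 2) 1).foldl
        (fun r i => PySem.Int.bxor r (length * (2 * i + 1) + start)) r
  else
    if PySem.Int.mod length 2 = 0 then
      let inum := length - 1
      let r := (PySem.List.pyRange 0 length 1).foldl
        (fun r i => PySem.Int.bxor r (length * i + start)) (0 : Int)
      (PySem.List.pyRange 0 (PySem.Int.floordiv length 2) 1).foldl
        (fun r i => PySem.Int.bxor r (inum * (2 * i + 1) + start)) r
    else
      (PySem.List.pyRange 0 (PySem.Int.floordiv (length + 1) 2) 1).foldl
        (fun r i => PySem.Int.bxor r (length * 2 * i + start)) (0 : Int)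

-- ===== PORT B =====
-- XOR of all integers in range(0, n), n ≥ 0, in O(1)
def pvPrefix (n : Int) : Int :=
  let m := PySem.Int.mod n 4
  if m = 0 then 0 else if m = 1 then n - 1 else if m = 2 then 1 else n

-- XOR of all integers in range(-m, 0), m ≥ 0, in O(1)
def pvNegPrefix (m : Int) : Int :=
  if PySem.Int.mod m 2 = 0 then pvPrefix m else Int.not (pvPrefix m)

-- XOR of all integers in range(a, b), a ≤ b, in O(1)
def pvRangeXor (a : Int) (b : Int) : Int :=
  if 0 ≤ a then PySem.Int.bxor (pvPrefix a) (pvPrefix b)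
  else if b ≤ 0 then PySem.Int.bxor (pvNegPrefix (-a)) (pvNegPrefix (-b))
  else PySem.Int.bxor (pvNegPrefix (-a)) (pvPrefix b)

def solutionc_alt (start : Int) (length : Int) : Int :=
  if length ≤ 0 then 0
  else
    (PySem.List.pyRange 0 length 1).foldl
      (fun r i => PySem.Int.bxor r
        (pvRangeXor (start + i * length) (start + i * length + length - i))) 0

-- ===== PRECONDITION & SPEC =====
-- On non-positive length with even start and length % 4 ∈ {2, 3} (an empty grid), A returns 1 —
-- its loops never run and the leftover parity-initialised accumulator escapes — while B returns 0,
-- the XOR of an empty grid, which is the intended checksum.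
def D_solutionc (start : Int) (length : Int) : Prop :=
  length ≤ 0 ∧ start % 2 = 0 ∧ (length % 4 = 2 ∨ length % 4 = 3)
instance (start : Int) (length : Int) : Decidable (D_solutionc start length) := by
  unfold D_solutionc; infer_instance

def Spec_solutionc (start : Int) (length : Int) (out : Int) : Prop :=
  ¬ D_solutionc start length → out = solutionc_alt start length
instance (start : Int) (length : Int) (out : Int) : Decidable (Spec_solutionc start length out) := by
  unfold Spec_solutionc; infer_instance

def pvDiffWitness_solutionc : Int × Int := (0, -2)
def pvDiffWitnessOut_solutionc : Int × Int := (1, 0)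

-- ===== CLAIM (what is proved, stated in full; the proofs are below) =====
def Claim_unchanged_solutionc : Prop := ∀ (start : Int) (length : Int), Dom_solutionc start length → Spec_solutionc start length (solutionc start length)
def Claim_changed_solutionc : Prop := Dom_solutionc (pvDiffWitness_solutionc.1) (pvDiffWitness_solutionc.2) ∧ D_solutionc (pvDiffWitness_solutionc.1) (pvDiffWitness_solutionc.2) ∧ solutionc (pvDiffWitness_solutionc.1) (pvDiffWitness_solutionc.2) = pvDiffWitnessOut_solutionc.1 ∧ solutionc_alt (pvDiffWitness_solutionc.1) (pvDiffWitness_solutionc.2) = pvDiffWitnessOut_solutionc.2 ∧ pvDiffWitnessOut_solutionc.1 ≠ pvDiffWitnessOut_solutionc.2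
def Claim_exact_solutionc : Prop := ∀ (start : Int) (length : Int), Dom_solutionc start length → D_solutionc start length → solutionc start length ≠ solutionc_alt start length

-- ===== LEMMAS AND PROOFS =====

-- ---- two's-complement representation: every Int is (sign, magnitude) ----
def pvDc (s : Bool) (m : Nat) : Int := if s then -(m : Int) - 1 else (m : Int)

lemma pvDc_surj (a : Int) : ∃ s m, a = pvDc s m := by
  by_cases h : 0 ≤ a
  · exact ⟨false, a.toNat, by simp [pvDc]; omega⟩
  · exact ⟨true, (-a - 1).toNat, by simp [pvDc]; omega⟩

lemma pvBx_dc (s t : Bool) (m n : Nat) :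
    PySem.Int.bxor (pvDc s m) (pvDc t n) = pvDc (xor s t) (m ^^^ n) := by
  cases s <;> cases t <;> simp [pvDc, PySem.Int.bxor] <;> omega

lemma pvIntNot (a : Int) : Int.not a = -1 - a := by
  cases a with
  | ofNat n =>
    rw [show Int.not (Int.ofNat n) = Int.negSucc n from rfl, Int.negSucc_eq]
    simp [Int.ofNat_eq_natCast]; ring
  | negSucc n =>
    rw [show Int.not (Int.negSucc n) = Int.ofNat n from rfl, Int.negSucc_eq]
    simp [Int.ofNat_eq_natCast]

lemma pvNot_dc (s : Bool) (m : Nat) : Int.not (pvDc s m) = pvDc (!s) m := by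
  cases s <;> simp [pvDc, pvIntNot] <;> ring

lemma pvBxor_assoc (a b c : Int) :
    PySem.Int.bxor (PySem.Int.bxor a b) c = PySem.Int.bxor a (PySem.Int.bxor b c) := by
  obtain ⟨s, m, rfl⟩ := pvDc_surj a
  obtain ⟨t, n, rfl⟩ := pvDc_surj b
  obtain ⟨u, p, rfl⟩ := pvDc_surj c
  simp [pvBx_dc, Nat.xor_assoc, Bool.xor_assoc]

lemma pvBxor_zero_left (a : Int) : PySem.Int.bxor 0 a = a := by
  rw [PySem.Int.bxor_comm]; exact PySem.Int.bxor_zero a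

lemma pvBxor_left_comm (a b c : Int) :
    PySem.Int.bxor a (PySem.Int.bxor b c) = PySem.Int.bxor b (PySem.Int.bxor a c) := by
  rw [← pvBxor_assoc, PySem.Int.bxor_comm a b, pvBxor_assoc]

lemma pvBxor_cancel_left (a b : Int) : PySem.Int.bxor a (PySem.Int.bxor a b) = b := by
  rw [← pvBxor_assoc, PySem.Int.bxor_self, pvBxor_zero_left]

lemma pvShuffleEE (x p y : Int) :
    PySem.Int.bxor (PySem.Int.bxor x p) (PySem.Int.bxor x y) = PySem.Int.bxor p y := by
  rw [pvBxor_assoc, pvBxor_left_comm p x, pvBxor_cancel_left]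

lemma pvBxor_not_left (a b : Int) :
    PySem.Int.bxor (Int.not a) b = Int.not (PySem.Int.bxor a b) := by
  obtain ⟨s, m, rfl⟩ := pvDc_surj a
  obtain ⟨t, n, rfl⟩ := pvDc_surj b
  rw [pvNot_dc, pvBx_dc, pvBx_dc, pvNot_dc]
  cases s <;> cases t <;> rfl

lemma pvBxor_not_not (a b : Int) :
    PySem.Int.bxor (Int.not a) (Int.not b) = PySem.Int.bxor a b := by
  obtain ⟨s, m, rfl⟩ := pvDc_surj a
  obtain ⟨t, n, rfl⟩ := pvDc_surj b
  rw [pvNot_dc, pvNot_dc, pvBx_dc, pvBx_dc]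
  cases s <;> cases t <;> rfl

-- ---- the pair identity: an even a XORed with a+1 gives 1 ----
lemma pvNatPair (k : Nat) : (2 * k) ^^^ (2 * k + 1) = 1 := by
  apply Nat.eq_of_testBit_eq
  intro i
  rw [Nat.testBit_xor]
  cases i with
  | zero => simp [Nat.testBit_zero, Nat.add_mod]
  | succ j =>
    rw [Nat.testBit_succ, Nat.testBit_succ]
    rw [Nat.mul_add_div (by norm_num), Nat.mul_div_cancel_left _ (by norm_num)]
    simp [Nat.testBit_succ, Nat.zero_testBit]

lemma pvPair (a : Int) (h : a % 2 = 0) : PySem.Int.bxor a (a + 1) = 1 := by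
  rcases le_or_gt 0 a with ha | ha
  · obtain ⟨k, hk⟩ : ∃ k : Nat, a = ((2 * k : Nat) : Int) := ⟨a.toNat / 2, by push_cast; omega⟩
    subst hk
    have h1 : ((2 * k : Nat) : Int) + 1 = ((2 * k + 1 : Nat) : Int) := by push_cast; ring
    rw [h1, PySem.Int.bxor_natCast, pvNatPair]; rfl
  · obtain ⟨k, hk⟩ : ∃ k : Nat, a = pvDc true (2 * k + 1) :=
      ⟨(-a - 1).toNat / 2, by simp [pvDc]; omega⟩
    subst hk
    have h2 : pvDc true (2 * k + 1) + 1 = pvDc true (2 * k) := by simp [pvDc]; push_cast; ring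
    rw [h2, pvBx_dc, Nat.xor_comm, pvNatPair]; rfl

lemma pvOnePlus (a : Int) (h : a % 2 = 0) : PySem.Int.bxor 1 a = a + 1 := by
  have hp := pvPair a h
  calc PySem.Int.bxor 1 a = PySem.Int.bxor (PySem.Int.bxor a (a + 1)) a := by rw [hp]
    _ = a + 1 := by
        rw [PySem.Int.bxor_comm a (a + 1), pvBxor_assoc, PySem.Int.bxor_self,
          PySem.Int.bxor_zero]

-- ---- XOR folds over lists ----
def pvXL (l : List Int) : Int := l.foldr PySem.Int.bxor 0

lemma pvXL_cons (a : Int) (l : List Int) : pvXL (a :: l) = PySem.Int.bxor a (pvXL l) := rfl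

lemma pvXL_append (l1 l2 : List Int) :
    pvXL (l1 ++ l2) = PySem.Int.bxor (pvXL l1) (pvXL l2) := by
  induction l1 with
  | nil => simp [pvXL, pvBxor_zero_left]
  | cons a l ih => simp only [List.cons_append, pvXL_cons, ih, pvBxor_assoc]

lemma pvXL_perm {l1 l2 : List Int} (h : l1.Perm l2) : pvXL l1 = pvXL l2 := by
  induction h with
  | nil => rfl
  | cons a _ ih => simp [pvXL_cons, ih]
  | swap a b l => simp [pvXL_cons, pvBxor_left_comm]
  | trans _ _ ih1 ih2 => exact ih1.trans ih2

lemma pvFoldl_bx (f : Int → Int) (l : List Int) (c : Int) :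
    l.foldl (fun r x => PySem.Int.bxor r (f x)) c = PySem.Int.bxor c (pvXL (l.map f)) := by
  induction l generalizing c with
  | nil => simp [pvXL, PySem.Int.bxor_zero]
  | cons a l ih => simp only [List.foldl_cons, List.map_cons, ih, pvXL_cons, pvBxor_assoc]

-- ---- XOR over an indexed range ----
def pvXF (n : Nat) (f : Nat → Int) : Int := pvXL ((List.range n).map f)

lemma pvXF_zero (f : Nat → Int) : pvXF 0 f = 0 := rfl

lemma pvXF_succ (n : Nat) (f : Nat → Int) :
    pvXF (n + 1) f = PySem.Int.bxor (pvXF n f) (f n) := by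
  unfold pvXF
  rw [List.range_succ, List.map_append, pvXL_append]
  simp [pvXL, PySem.Int.bxor_zero]

lemma pvXF_congr {n : Nat} {f g : Nat → Int} (h : ∀ i, i < n → f i = g i) :
    pvXF n f = pvXF n g := by
  unfold pvXF
  congr 1
  exact List.map_congr_left (fun i hi => h i (List.mem_range.mp hi))

lemma pvXF_split (n : Nat) (g h : Nat → Int) :
    pvXF n (fun i => PySem.Int.bxor (g i) (h i)) = PySem.Int.bxor (pvXF n g) (pvXF n h) := by
  induction n with
  | zero => simp [pvXF_zero, pvBxor_zero_left]
  | succ n ih =>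
    rw [pvXF_succ, pvXF_succ, pvXF_succ, ih]
    rw [pvBxor_assoc, pvBxor_assoc]
    congr 1
    rw [pvBxor_left_comm]

lemma pvRange_evenodd (m : Nat) :
    (List.range (2 * m)).Perm
      ((List.range m).map (fun j => 2 * j) ++ (List.range m).map (fun j => 2 * j + 1)) := by
  induction m with
  | zero => simp
  | succ m ih =>
    have h2 : 2 * (m + 1) = 2 * m + 1 + 1 := by ring
    rw [h2]
    simp only [List.range_succ, List.map_append, List.map_cons, List.map_nil]
    refine ((ih.append_right _).append_right _).trans ?_
    simp only [List.append_assoc, List.singleton_append, List.cons_append, List.nil_append]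
    exact List.Perm.append_left _ List.perm_middle

lemma pvXF_evenodd (m : Nat) (f : Nat → Int) :
    pvXF (2 * m) f =
      PySem.Int.bxor (pvXF m (fun j => f (2 * j))) (pvXF m (fun j => f (2 * j + 1))) := by
  unfold pvXF
  rw [pvXL_perm ((pvRange_evenodd m).map f), List.map_append, pvXL_append,
    List.map_map, List.map_map]
  rfl

lemma pvXF_evenodd' (m : Nat) (f : Nat → Int) :
    pvXF (2 * m + 1) f =
      PySem.Int.bxor (pvXF (m + 1) (fun j => f (2 * j))) (pvXF m (fun j => f (2 * j + 1))) := by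
  rw [pvXF_succ, pvXF_evenodd, pvXF_succ]
  rw [pvBxor_assoc, PySem.Int.bxor_comm (pvXF m fun j => f (2 * j + 1)) (f (2 * m)),
    ← pvBxor_assoc]

lemma pvXF_rev (n : Nat) (f : Nat → Int) :
    pvXF n (fun j => f (n - 1 - j)) = pvXF n f := by
  unfold pvXF
  apply pvXL_perm
  have h : ((List.range n).map f).reverse = (List.range n).map (fun j => f (n - 1 - j)) := by
    rw [← List.map_reverse, List.range_eq_range', List.reverse_range']
    simp only [List.map_map, ← List.range_eq_range']
    apply List.map_congr_left
    intro i hi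
    simp only [Function.comp]
    congr 1
    omega
  rw [← h]
  exact (((List.range n).map f).reverse_perm)

lemma pvXF_shift (n : Nat) (f : Nat → Int) :
    pvXF (n + 1) f = PySem.Int.bxor (f 0) (pvXF n (fun j => f (j + 1))) := by
  unfold pvXF
  rw [List.range_succ_eq_map, List.map_cons, pvXL_cons, List.map_map]
  rfl

-- ---- XOR of a consecutive integer range, by recursion on its size ----
def pvXR (a : Int) : Nat → Int
  | 0 => 0
  | n + 1 => PySem.Int.bxor (pvXR a n) (a + n)

lemma pvXR_succ (a : Int) (n : Nat) :
    pvXR a (n + 1) = PySem.Int.bxor (pvXR a n) (a + n) := rfl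

lemma pvXR_split (a : Int) (c d : Nat) :
    pvXR a (c + d) = PySem.Int.bxor (pvXR a c) (pvXR (a + c) d) := by
  induction d with
  | zero => simp [pvXR, PySem.Int.bxor_zero]
  | succ d ih =>
    rw [show c + (d + 1) = (c + d) + 1 from rfl, pvXR_succ, ih, pvXR_succ, pvBxor_assoc]
    congr 2
    push_cast; ring

lemma pvXR_one (a : Int) : pvXR a 1 = a := by
  rw [show (1 : Nat) = 0 + 1 from rfl, pvXR_succ]
  simp [pvXR, pvBxor_zero_left]

lemma pvXR_cons (a : Int) (n : Nat) :
    pvXR a (n + 1) = PySem.Int.bxor a (pvXR (a + 1) n) := by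
  rw [show n + 1 = 1 + n by ring, pvXR_split, pvXR_one]
  norm_num

def pvP (k : Nat) : Int := if k % 2 = 1 then 1 else 0

lemma pvP_zero : pvP 0 = 0 := rfl

lemma pvXR_pairs (a : Int) (k : Nat) (h : a % 2 = 0) : pvXR a (2 * k) = pvP k := by
  induction k with
  | zero => rfl
  | succ k ih =>
    rw [show 2 * (k + 1) = (2 * k + 1) + 1 by ring, pvXR_succ, pvXR_succ, ih, pvBxor_assoc]
    have hpair : PySem.Int.bxor (a + (2 * k : Nat)) (a + ((2 * k + 1 : Nat) : Nat)) = 1 := by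
      have he : (a + ((2 * k + 1 : Nat) : Nat) : Int) = (a + ((2 * k : Nat) : Int)) + 1 := by
        push_cast; ring
      rw [he]
      apply pvPair
      have hd : a + ((2 * k : Nat) : Int) = a + 2 * (k : Int) := by push_cast; ring
      rw [hd, Int.add_mul_emod_self_left]
      exact h
    rw [hpair]
    rcases Nat.mod_two_eq_zero_or_one k with hk | hk
    · have e1 : pvP k = 0 := by simp [pvP, hk]
      have e2 : pvP (k + 1) = 1 := by simp [pvP, Nat.add_mod, hk]
      rw [e1, e2, pvBxor_zero_left]
    · have e1 : pvP k = 1 := by simp [pvP, hk]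
      have e2 : pvP (k + 1) = 0 := by simp [pvP, Nat.add_mod, hk]
      rw [e1, e2]
      exact PySem.Int.bxor_self 1

lemma pvXR_oddcnt (a : Int) (k : Nat) (h : a % 2 = 0) :
    pvXR a (2 * k + 1) = PySem.Int.bxor (pvP k) (a + 2 * k) := by
  rw [pvXR_succ, pvXR_pairs a k h]
  congr 1
  all_goals push_cast; ring

-- ---- correctness of B's closed forms ----
lemma pvPrefix_nat (n : Nat) : pvPrefix ((n : Nat) : Int) = pvXR 0 n := by
  have hm : PySem.Int.mod ((n : Nat) : Int) 4 = ((n % 4 : Nat) : Int) := by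
    rw [PySem.Int.mod_eq_emod_of_pos (by norm_num)]; omega
  unfold pvPrefix
  simp only [hm]
  have h4 : n % 4 = 0 ∨ n % 4 = 1 ∨ n % 4 = 2 ∨ n % 4 = 3 := by omega
  rcases h4 with h | h | h | h
  · obtain ⟨k, hk, hk2⟩ : ∃ k, n = 2 * k ∧ k % 2 = 0 := ⟨n / 2, by omega, by omega⟩
    rw [h, hk, pvXR_pairs 0 k (by norm_num)]
    simp [pvP, hk2]
  · obtain ⟨k, hk, hk2⟩ : ∃ k, n = 2 * k + 1 ∧ k % 2 = 0 := ⟨n / 2, by omega, by omega⟩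
    rw [h, hk, pvXR_oddcnt 0 k (by norm_num)]
    have : pvP k = 0 := by simp [pvP, hk2]
    rw [this, pvBxor_zero_left]
    push_cast; ring
  · obtain ⟨k, hk, hk2⟩ : ∃ k, n = 2 * k ∧ k % 2 = 1 := ⟨n / 2, by omega, by omega⟩
    rw [h, hk, pvXR_pairs 0 k (by norm_num)]
    simp [pvP, hk2]
  · obtain ⟨k, hk, hk2⟩ : ∃ k, n = 2 * k + 1 ∧ k % 2 = 1 := ⟨n / 2, by omega, by omega⟩
    rw [h, hk, pvXR_oddcnt 0 k (by norm_num)]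
    have h1 : pvP k = 1 := by simp [pvP, hk2]
    rw [h1, pvOnePlus _ (by omega)]
    push_cast; omega

lemma pvPrefix_succ (m : Nat) :
    pvPrefix (((m + 1 : Nat) : Nat) : Int) =
      PySem.Int.bxor ((m : Nat) : Int) (pvPrefix ((m : Nat) : Int)) := by
  rw [pvPrefix_nat, pvPrefix_nat, pvXR_succ, PySem.Int.bxor_comm]
  norm_num

lemma pvNegPrefix_nat (m : Nat) : pvNegPrefix ((m : Nat) : Int) = pvXR (-(m : Int)) m := by
  induction m with
  | zero => decide
  | succ m ih =>
    have hcons : pvXR (-((m + 1 : Nat) : Int)) (m + 1)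
        = PySem.Int.bxor (Int.not ((m : Nat) : Int)) (pvXR (-(m : Int)) m) := by
      have e2 : -(((m + 1 : Nat) : Nat) : Int) + 1 = -((m : Nat) : Int) := by push_cast; ring
      have e1 : -(((m + 1 : Nat) : Nat) : Int) = Int.not ((m : Nat) : Int) := by
        rw [pvIntNot]; push_cast; ring
      rw [pvXR_cons, e2, e1]
    rw [hcons, ← ih]
    have hm2 : PySem.Int.mod ((m : Nat) : Int) 2 = ((m % 2 : Nat) : Int) := by
      rw [PySem.Int.mod_eq_emod_of_pos (by norm_num)]; omega
    have hm2' : PySem.Int.mod (((m + 1 : Nat) : Nat) : Int) 2 = (((m + 1) % 2 : Nat) : Int) := by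
      rw [PySem.Int.mod_eq_emod_of_pos (by norm_num)]; push_cast; omega
    unfold pvNegPrefix
    rw [hm2, hm2']
    rcases Nat.mod_two_eq_zero_or_one m with hp | hp
    · rw [if_neg (show ¬((((m + 1) % 2 : Nat) : Int) = 0) by omega),
        if_pos (show (((m % 2 : Nat) : Nat) : Int) = 0 by omega)]
      rw [pvBxor_not_left]
      congr 1
      rw [pvPrefix_succ]
    · rw [if_pos (show (((m + 1) % 2 : Nat) : Int) = 0 by omega),
        if_neg (show ¬((((m % 2 : Nat) : Nat) : Int) = 0) by omega)]
      rw [pvBxor_not_not, pvPrefix_succ]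

lemma pvRangeXor_eq (a : Int) (c : Nat) : pvRangeXor a (a + (c : Int)) = pvXR a c := by
  unfold pvRangeXor
  by_cases ha : 0 ≤ a
  · rw [if_pos ha]
    obtain ⟨p, rfl⟩ : ∃ p : Nat, a = ((p : Nat) : Int) := ⟨a.toNat, by omega⟩
    have h2 : ((p : Nat) : Int) + (c : Int) = (((p + c : Nat) : Nat) : Int) := by push_cast; ring
    rw [h2, pvPrefix_nat, pvPrefix_nat, pvXR_split 0 p c, pvBxor_cancel_left]
    norm_num
  · rw [if_neg ha]
    have hp : -a = (((-a).toNat : Nat) : Int) := by omega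
    set p : Nat := (-a).toNat with hpdef
    by_cases hb : a + (c : Int) ≤ 0
    · rw [if_pos hb]
      have hcp : c ≤ p := by omega
      have hsplit := pvXR_split (-(p : Int)) c (p - c)
      have hc1 : c + (p - c) = p := by omega
      have hc2 : -(p : Int) + (c : Int) = -(((p - c : Nat) : Nat) : Int) := by omega
      rw [hc1, hc2] at hsplit
      have g1 : pvNegPrefix (-a) = pvXR (-(p : Int)) p := by
        rw [show -a = ((p : Nat) : Int) from hp]; exact pvNegPrefix_nat p
      have g2 : pvNegPrefix (-(a + (c : Int))) = pvXR (-(((p - c : Nat) : Nat) : Int)) (p - c) := by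
        rw [show -(a + (c : Int)) = (((p - c : Nat) : Nat) : Int) by omega]
        exact pvNegPrefix_nat (p - c)
      rw [g1, g2, hsplit]
      have ha' : a = -(p : Int) := by omega
      rw [pvBxor_assoc, PySem.Int.bxor_self, PySem.Int.bxor_zero, ha']
    · rw [if_neg hb]
      set b : Nat := (a + (c : Int)).toNat with hbdef
      have hcb : c = p + b := by omega
      have hsplit := pvXR_split (-(p : Int)) p b
      have hz : -(p : Int) + (p : Int) = 0 := by ring
      rw [hz] at hsplit
      have g1 : pvNegPrefix (-a) = pvXR (-(p : Int)) p := by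
        rw [show -a = ((p : Nat) : Int) from hp]; exact pvNegPrefix_nat p
      have g2 : pvPrefix (a + (c : Int)) = pvXR 0 b := by
        rw [show a + (c : Int) = ((b : Nat) : Int) by omega]; exact pvPrefix_nat b
      rw [g1, g2]
      have ha' : a = -(p : Int) := by omega
      rw [ha', hcb, hsplit]

-- ---- bridging the ports' loops to pvXF ----
lemma pvLoopA (b : Int) (f : Int → Int) (c : Int) :
    (PySem.List.pyRange 0 b 1).foldl (fun r i => PySem.Int.bxor r (f i)) c
      = PySem.Int.bxor c (pvXF b.toNat (fun k => f ((k : Nat) : Int))) := by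
  rw [PySem.List.pyRange_one, pvFoldl_bx, List.map_map]
  unfold pvXF
  rw [show b - 0 = b by ring]
  have hmap : List.map (f ∘ fun k : Nat => 0 + (k : Int)) (List.range b.toNat)
      = List.map (fun k : Nat => f ((k : Nat) : Int)) (List.range b.toNat) :=
    List.map_congr_left (fun k _ => by simp)
  rw [hmap]

-- empty loops for non-positive length
lemma pvNil1 (L : Int) (hL : L ≤ 0) : PySem.List.pyRange 0 (PySem.Int.floordiv L 2) 1 = [] := by
  apply PySem.List.pyRange_one_eq_nil
  rw [PySem.Int.floordiv_eq_ediv_of_pos (by norm_num)]; omega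

lemma pvNil2 (L : Int) (hL : L ≤ 0) : PySem.List.pyRange 0 L 1 = [] :=
  PySem.List.pyRange_one_eq_nil hL

lemma pvNil3 (L : Int) (hL : L ≤ 0) : PySem.List.pyRange 0 (PySem.Int.floordiv (L + 1) 2) 1 = [] := by
  apply PySem.List.pyRange_one_eq_nil
  rw [PySem.Int.floordiv_eq_ediv_of_pos (by norm_num)]; omega

-- mod bridges
lemma pvMod2 (a : Int) : PySem.Int.mod a 2 = a % 2 :=
  PySem.Int.mod_eq_emod_of_pos (by norm_num)
lemma pvMod4 (a : Int) : PySem.Int.mod a 4 = a % 4 :=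
  PySem.Int.mod_eq_emod_of_pos (by norm_num)

-- A's initial accumulator on non-positive length, as a single value
lemma pvA_empty (s L : Int) (hL : L ≤ 0) :
    solutionc s L =
      if s % 2 = 0 ∧ (L % 4 = 2 ∨ L % 4 = 3) then 1 else 0 := by
  unfold solutionc
  rw [pvNil1 L hL, pvNil2 L hL, pvNil3 L hL, pvMod2, pvMod2, pvMod4, pvMod4]
  simp only [List.foldl_nil]
  by_cases hs : s % 2 = 0
  · rw [if_pos hs]
    by_cases h2 : L % 2 = 0
    · rw [if_pos h2]
      by_cases h4 : L % 4 = 0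
      · rw [if_pos h4, if_neg (show ¬(s % 2 = 0 ∧ (L % 4 = 2 ∨ L % 4 = 3)) by omega)]
      · rw [if_neg h4, if_pos (show s % 2 = 0 ∧ (L % 4 = 2 ∨ L % 4 = 3) from ⟨hs, by omega⟩)]
    · rw [if_neg h2]
      by_cases h4 : (L - 1) % 4 = 0
      · rw [if_pos h4, if_neg (show ¬(s % 2 = 0 ∧ (L % 4 = 2 ∨ L % 4 = 3)) by omega)]
      · rw [if_neg h4, if_pos (show s % 2 = 0 ∧ (L % 4 = 2 ∨ L % 4 = 3) from ⟨hs, by omega⟩)]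
  · rw [if_neg hs, if_neg (show ¬(s % 2 = 0 ∧ (L % 4 = 2 ∨ L % 4 = 3)) by omega)]
    by_cases h2 : L % 2 = 0
    · rw [if_pos h2]
    · rw [if_neg h2]

-- B as a fold of row XORs
lemma pvBalt (s L : Int) (n : Nat) (hL : L = ((n : Nat) : Int)) (hn : 0 < n) :
    solutionc_alt s L = pvXF n (fun k => pvXR (s + (k : Int) * L) (n - k)) := by
  unfold solutionc_alt
  rw [if_neg (by omega)]
  rw [pvLoopA L (fun i => pvRangeXor (s + i * L) (s + i * L + L - i)) 0, pvBxor_zero_left]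
  rw [show L.toNat = n by omega]
  apply pvXF_congr
  intro k hk
  have hsp : s + (k : Int) * L + L - (k : Int) = (s + (k : Int) * L) + (((n - k : Nat) : Nat) : Int) := by
    subst hL; push_cast; omega
  rw [hsp, pvRangeXor_eq]

-- the parity-bit folds
lemma pvPfold_rev (m : Nat) : pvXF m (fun j => pvP (m - 1 - j)) = pvXF m pvP :=
  pvXF_rev m pvP

lemma pvPfold_shift (m : Nat) :
    pvXF m (fun j => pvP (m - j)) = PySem.Int.bxor (pvXF m pvP) (pvP m) := by
  have h1 : pvXF m (fun j => pvP (m - j)) = pvXF m (fun j => pvP ((m - 1 - j) + 1)) := by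
    apply pvXF_congr
    intro j hj
    congr 1
    omega
  have h2 : pvXF m (fun j => pvP ((m - 1 - j) + 1)) = pvXF m (fun j => pvP (j + 1)) :=
    pvXF_rev m (fun i => pvP (i + 1))
  have h3 := pvXF_shift m pvP
  rw [pvP_zero, pvBxor_zero_left] at h3
  rw [h1, h2, ← h3, pvXF_succ]

-- pvP m as A's initial accumulator
lemma pvP_even_init (m : Nat) :
    (if (((2 * m : Nat) : Int)) % 4 = 0 then (0 : Int) else 1) = pvP m := by
  unfold pvP
  by_cases h : m % 2 = 1
  · rw [if_neg (show ¬((((2 * m : Nat) : Nat) : Int) % 4 = 0) by omega), if_pos h]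
  · rw [if_pos (show (((2 * m : Nat) : Nat) : Int) % 4 = 0 by omega), if_neg h]

lemma pvP_odd_init (m : Nat) :
    (if (((2 * m + 1 : Nat) : Int) - 1) % 4 = 0 then (0 : Int) else 1) = pvP m := by
  unfold pvP
  by_cases h : m % 2 = 1
  · rw [if_neg (show ¬(((((2 * m + 1 : Nat) : Nat) : Int) - 1) % 4 = 0) by omega), if_pos h]
  · rw [if_pos (show ((((2 * m + 1 : Nat) : Nat) : Int) - 1) % 4 = 0 by omega), if_neg h]

-- parity helpers
lemma pvParAdd (x t : Int) : (x + 2 * t) % 2 = x % 2 := Int.add_mul_emod_self_left x 2 t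

-- ===================== the four main cases =====================

lemma pvCaseEE (s : Int) (m : Nat) (hm : 0 < m) (hs : s % 2 = 0) :
    solutionc s (((2 * m : Nat) : Int)) = solutionc_alt s (((2 * m : Nat) : Int)) := by
  set L : Int := ((2 * m : Nat) : Int) with hLdef
  have hL2 : L % 2 = 0 := by omega
  -- ---- A side ----
  have hA : solutionc s L =
      PySem.Int.bxor (pvP m) (pvXF m (fun j => (L - 1) * 2 * ((j : Int) + 1) + s)) := by
    unfold solutionc
    rw [pvMod2, pvMod2, pvMod4]
    rw [if_pos hs, if_pos hL2]
    rw [pvLoopA (PySem.Int.floordiv L 2) (fun i => (L - 1) * 2 * (i + 1) + s) _]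
    rw [show (PySem.Int.floordiv L 2).toNat = m by
      rw [PySem.Int.floordiv_eq_ediv_of_pos (by norm_num)]; omega]
    rw [pvP_even_init]
  -- ---- B side ----
  have hB : solutionc_alt s L =
      PySem.Int.bxor (pvP m) (pvXF m (fun j => (L - 1) * 2 * ((j : Int) + 1) + s)) := by
    rw [pvBalt s L (2 * m) rfl (by omega)]
    rw [pvXF_evenodd]
    have hEv : pvXF m (fun j => pvXR (s + ((2 * j : Nat) : Int) * L) (2 * m - 2 * j))
        = PySem.Int.bxor (pvXF m pvP) (pvP m) := by
      rw [← pvPfold_shift]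
      apply pvXF_congr
      intro j hj
      have hc : 2 * m - 2 * j = 2 * (m - j) := by omega
      rw [hc]
      apply pvXR_pairs
      have hd : s + ((2 * j : Nat) : Int) * L = s + 2 * ((j : Int) * L) := by simp only [hLdef]; push_cast; ring
      rw [hd, pvParAdd]; exact hs
    have hOd : pvXF m (fun j => pvXR (s + ((2 * j + 1 : Nat) : Int) * L) (2 * m - (2 * j + 1)))
        = PySem.Int.bxor (pvXF m (fun j => pvP (m - 1 - j)))
            (pvXF m (fun j => (L - 1) * 2 * ((j : Int) + 1) + s)) := by
      rw [← pvXF_split]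
      apply pvXF_congr
      intro j hj
      have hc : 2 * m - (2 * j + 1) = 2 * (m - j - 1) + 1 := by omega
      rw [hc]
      rw [pvXR_oddcnt _ _ (by
        have hd : s + ((2 * j + 1 : Nat) : Int) * L = s + 2 * ((j : Int) * L + (m : Int)) := by
          simp only [hLdef]; push_cast; ring
        rw [hd, pvParAdd]; exact hs)]
      congr 1
      · show pvP (m - j - 1) = pvP (m - 1 - j)
        congr 1; omega
      · have he : ((m - j - 1 : Nat) : Int) = (m : Int) - (j : Int) - 1 := by omega
        simp only [hLdef]; push_cast [he]; ring
    rw [hEv, hOd, pvPfold_rev, pvShuffleEE]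
  rw [hA, hB]

lemma pvCaseEO (s : Int) (m : Nat) (hs : s % 2 = 0) :
    solutionc s (((2 * m + 1 : Nat) : Int)) = solutionc_alt s (((2 * m + 1 : Nat) : Int)) := by
  set L : Int := ((2 * m + 1 : Nat) : Int) with hLdef
  have hL2 : ¬ (L % 2 = 0) := by omega
  -- ---- A side ----
  have hA : solutionc s L =
      PySem.Int.bxor (PySem.Int.bxor (pvP m)
          (pvXF (2 * m + 1) (fun k => (L - 1) * ((k : Int) + 1) + s)))
        (pvXF m (fun k => L * (2 * (k : Int) + 1) + s)) := by
    unfold solutionc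
    rw [pvMod2, pvMod2]
    rw [if_pos hs, if_neg hL2]
    show (PySem.List.pyRange 0 (PySem.Int.floordiv L 2) 1).foldl
        (fun r i => PySem.Int.bxor r (L * (2 * i + 1) + s))
        ((PySem.List.pyRange 0 L 1).foldl
          (fun r i => PySem.Int.bxor r ((L - 1) * (i + 1) + s))
          (if PySem.Int.mod (L - 1) 4 = 0 then (0 : Int) else 1)) = _
    rw [pvMod4 (L - 1)]
    rw [pvLoopA L (fun i => (L - 1) * (i + 1) + s) _]
    rw [pvLoopA (PySem.Int.floordiv L 2) (fun i => L * (2 * i + 1) + s) _]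
    rw [show (PySem.Int.floordiv L 2).toNat = m by
      rw [PySem.Int.floordiv_eq_ediv_of_pos (by norm_num)]; omega]
    rw [show L.toNat = 2 * m + 1 by omega]
    rw [pvP_odd_init]
  -- ---- B side ----
  have hB : solutionc_alt s L =
      PySem.Int.bxor (PySem.Int.bxor (pvP m)
          (pvXF (2 * m + 1) (fun k => (L - 1) * ((k : Int) + 1) + s)))
        (pvXF m (fun k => L * (2 * (k : Int) + 1) + s)) := by
    rw [pvBalt s L (2 * m + 1) rfl (by omega)]
    rw [pvXF_evenodd']
    have hEv : pvXF (m + 1) (fun j => pvXR (s + ((2 * j : Nat) : Int) * L) (2 * m + 1 - 2 * j))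
        = PySem.Int.bxor (pvXF (m + 1) (fun j => pvP (m - j)))
            (pvXF (m + 1) (fun j => (L - 1) * (((2 * j : Nat) : Int) + 1) + s)) := by
      rw [← pvXF_split]
      apply pvXF_congr
      intro j hj
      have hc : 2 * m + 1 - 2 * j = 2 * (m - j) + 1 := by omega
      rw [hc]
      rw [pvXR_oddcnt _ _ (by
        have hd : s + ((2 * j : Nat) : Int) * L = s + 2 * ((j : Int) * L) := by simp only [hLdef]; push_cast; ring
        rw [hd, pvParAdd]; exact hs)]
      congr 1
      have he : ((m - j : Nat) : Int) = (m : Int) - (j : Int) := by omega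
      simp only [hLdef]; push_cast [he]; ring
    have hOd : pvXF m (fun j => pvXR (s + ((2 * j + 1 : Nat) : Int) * L) (2 * m + 1 - (2 * j + 1)))
        = PySem.Int.bxor (pvXF m (fun k => L * (2 * (k : Int) + 1) + s))
            (PySem.Int.bxor (pvXF m (fun j => pvP (m - 1 - j)))
              (pvXF m (fun j => (L - 1) * (((2 * j + 1 : Nat) : Int) + 1) + s))) := by
      rw [← pvXF_split, ← pvXF_split]
      apply pvXF_congr
      intro j hj
      have hc : 2 * m + 1 - (2 * j + 1) = (2 * (m - j - 1) + 1) + 1 := by omega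
      rw [hc, pvXR_cons]
      congr 1
      · simp only [hLdef]; push_cast; ring
      · rw [pvXR_oddcnt _ _ (by
          have hd : s + ((2 * j + 1 : Nat) : Int) * L + 1 = (s + 1 + 1) + 2 * ((j : Int) * L + (m : Int)) := by
            simp only [hLdef]; push_cast; ring
          rw [hd, pvParAdd]; omega)]
        congr 1
        · congr 1; omega
        · have he : ((m - j - 1 : Nat) : Int) = (m : Int) - (j : Int) - 1 := by omega
          simp only [hLdef]; push_cast [he]; ring
    rw [hEv, hOd, pvPfold_rev]
    -- pure XOR algebra now
    have hrev : pvXF (m + 1) (fun j => pvP (m - j)) = pvXF (m + 1) pvP := by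
      have := pvXF_rev (m + 1) pvP
      rw [← this]
      apply pvXF_congr
      intro j hj
      congr 1 <;> omega
    rw [hrev, pvXF_succ m pvP]
    have hsplitT := pvXF_evenodd' m (fun k => (L - 1) * ((k : Int) + 1) + s)
    have hTE : pvXF (m + 1) (fun j => (L - 1) * (((2 * j : Nat) : Int) + 1) + s)
        = pvXF (m + 1) (fun j => (L - 1) * (((2 * j : Int)) + 1) + s) := by
      apply pvXF_congr; intro j hj; simp only [hLdef]; push_cast; ring
    have hTO : pvXF m (fun j => (L - 1) * (((2 * j + 1 : Nat) : Int) + 1) + s)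
        = pvXF m (fun j => (L - 1) * ((2 * (j : Int) + 1) + 1) + s) := by
      apply pvXF_congr; intro j hj; simp only [hLdef]; push_cast; ring
    rw [hTE, hTO]
    set P := pvXF m pvP
    set q := pvP m
    set E := pvXF (m + 1) (fun j => (L - 1) * ((2 * (j : Int)) + 1) + s)
    set O := pvXF m (fun j => (L - 1) * ((2 * (j : Int) + 1) + 1) + s)
    set U := pvXF m (fun k => L * (2 * (k : Int) + 1) + s)
    have hT : pvXF (2 * m + 1) (fun k => (L - 1) * ((k : Int) + 1) + s) = PySem.Int.bxor E O := by
      rw [hsplitT]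
      congr 1 <;> (apply pvXF_congr; intro j hj; simp only [hLdef]; push_cast; ring)
    rw [hT]
    -- goal: bxor (bxor (bxor P q) E) (bxor U (bxor P O)) = bxor (bxor q (bxor E O)) U
    rw [pvBxor_assoc P q E, pvBxor_left_comm U P O, pvShuffleEE]
    rw [pvBxor_assoc q E (PySem.Int.bxor U O), PySem.Int.bxor_comm U O,
      ← pvBxor_assoc E O U, ← pvBxor_assoc q (PySem.Int.bxor E O) U]
  rw [hA, hB]

lemma pvCaseOE (s : Int) (m : Nat) (hm : 0 < m) (hs : s % 2 = 1) :
    solutionc s (((2 * m : Nat) : Int)) = solutionc_alt s (((2 * m : Nat) : Int)) := by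
  set L : Int := ((2 * m : Nat) : Int) with hLdef
  have hL2 : L % 2 = 0 := by omega
  -- ---- A side ----
  have hA : solutionc s L =
      PySem.Int.bxor (pvXF (2 * m) (fun k => L * (k : Int) + s))
        (pvXF m (fun k => (L - 1) * (2 * (k : Int) + 1) + s)) := by
    unfold solutionc
    rw [pvMod2, pvMod2]
    rw [if_neg (show ¬(s % 2 = 0) by omega), if_pos hL2]
    show (PySem.List.pyRange 0 (PySem.Int.floordiv L 2) 1).foldl
        (fun r i => PySem.Int.bxor r ((L - 1) * (2 * i + 1) + s))
        ((PySem.List.pyRange 0 L 1).foldl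
          (fun r i => PySem.Int.bxor r (L * i + s)) 0) = _
    rw [pvLoopA L (fun i => L * i + s) _]
    rw [pvLoopA (PySem.Int.floordiv L 2) (fun i => (L - 1) * (2 * i + 1) + s) _]
    rw [show (PySem.Int.floordiv L 2).toNat = m by
      rw [PySem.Int.floordiv_eq_ediv_of_pos (by norm_num)]; omega]
    rw [show L.toNat = 2 * m by omega]
    rw [pvBxor_zero_left]
  -- ---- B side ----
  have hB : solutionc_alt s L =
      PySem.Int.bxor (pvXF (2 * m) (fun k => L * (k : Int) + s))
        (pvXF m (fun k => (L - 1) * (2 * (k : Int) + 1) + s)) := by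
    rw [pvBalt s L (2 * m) rfl (by omega)]
    rw [pvXF_evenodd]
    have hEv : pvXF m (fun j => pvXR (s + ((2 * j : Nat) : Int) * L) (2 * m - 2 * j))
        = PySem.Int.bxor (pvXF m (fun j => L * (((2 * j : Nat) : Int)) + s))
            (PySem.Int.bxor (pvXF m (fun j => pvP (m - 1 - j)))
              (pvXF m (fun k => (L - 1) * (2 * (k : Int) + 1) + s))) := by
      rw [← pvXF_split, ← pvXF_split]
      apply pvXF_congr
      intro j hj
      have hc : 2 * m - 2 * j = (2 * (m - j - 1) + 1) + 1 := by omega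
      rw [hc, pvXR_cons]
      congr 1
      · simp only [hLdef]; push_cast; ring
      · rw [pvXR_oddcnt _ _ (by
          have hd : s + ((2 * j : Nat) : Int) * L + 1 = (s + 1) + 2 * ((j : Int) * L) := by
            simp only [hLdef]; push_cast; ring
          rw [hd, pvParAdd]; omega)]
        congr 1
        · congr 1; omega
        · have he : ((m - j - 1 : Nat) : Int) = (m : Int) - (j : Int) - 1 := by omega
          simp only [hLdef]; push_cast [he]; ring
    have hOd : pvXF m (fun j => pvXR (s + ((2 * j + 1 : Nat) : Int) * L) (2 * m - (2 * j + 1)))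
        = PySem.Int.bxor (pvXF m (fun j => L * (((2 * j + 1 : Nat) : Int)) + s))
            (pvXF m (fun j => pvP (m - 1 - j))) := by
      rw [← pvXF_split]
      apply pvXF_congr
      intro j hj
      have hc : 2 * m - (2 * j + 1) = (2 * (m - j - 1)) + 1 := by omega
      rw [hc, pvXR_cons]
      congr 1
      · simp only [hLdef]; push_cast; ring
      · rw [pvXR_pairs _ _ (by
          have hd : s + ((2 * j + 1 : Nat) : Int) * L + 1 = (s + 1) + 2 * ((j : Int) * L + (m : Int)) := by
            simp only [hLdef]; push_cast; ring
          rw [hd, pvParAdd]; omega)]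
        congr 1
        omega
    rw [hEv, hOd, pvPfold_rev]
    have hV := pvXF_evenodd m (fun k => L * (k : Int) + s)
    have hVE : pvXF m (fun j => L * (((2 * j : Nat) : Int)) + s)
        = pvXF m (fun j => L * ((2 * j : Int)) + s) := by
      apply pvXF_congr; intro j hj; simp only [hLdef]; push_cast; ring
    have hVO : pvXF m (fun j => L * (((2 * j + 1 : Nat) : Int)) + s)
        = pvXF m (fun j => L * ((2 * (j : Int) + 1)) + s) := by
      apply pvXF_congr; intro j hj; simp only [hLdef]; push_cast; ring
    rw [hVE, hVO]
    set P := pvXF m pvP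
    set Ev := pvXF m (fun j => L * ((2 * j : Int)) + s)
    set Ov := pvXF m (fun j => L * ((2 * (j : Int) + 1)) + s)
    set W := pvXF m (fun k => (L - 1) * (2 * (k : Int) + 1) + s)
    have hVeq : pvXF (2 * m) (fun k => L * (k : Int) + s) = PySem.Int.bxor Ev Ov := by
      rw [hV]
      congr 1 <;> (apply pvXF_congr; intro j hj; simp only [hLdef]; push_cast; ring)
    rw [hVeq]
    -- goal: bxor (bxor Ev (bxor P W)) (bxor Ov P) = bxor (bxor Ev Ov) W
    rw [pvBxor_assoc Ev (PySem.Int.bxor P W) (PySem.Int.bxor Ov P)]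
    rw [PySem.Int.bxor_comm Ov P, pvShuffleEE P W Ov]
    rw [PySem.Int.bxor_comm W Ov, ← pvBxor_assoc Ev Ov W]
  rw [hA, hB]

lemma pvCaseOO (s : Int) (m : Nat) (hs : s % 2 = 1) :
    solutionc s (((2 * m + 1 : Nat) : Int)) = solutionc_alt s (((2 * m + 1 : Nat) : Int)) := by
  set L : Int := ((2 * m + 1 : Nat) : Int) with hLdef
  have hL2 : ¬ (L % 2 = 0) := by omega
  -- ---- A side ----
  have hA : solutionc s L = pvXF (m + 1) (fun k => L * 2 * (k : Int) + s) := by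
    unfold solutionc
    rw [pvMod2, pvMod2]
    rw [if_neg (show ¬(s % 2 = 0) by omega), if_neg hL2]
    show (PySem.List.pyRange 0 (PySem.Int.floordiv (L + 1) 2) 1).foldl
        (fun r i => PySem.Int.bxor r (L * 2 * i + s)) 0 = _
    rw [pvLoopA (PySem.Int.floordiv (L + 1) 2) (fun i => L * 2 * i + s) _]
    rw [show (PySem.Int.floordiv (L + 1) 2).toNat = m + 1 by
      rw [PySem.Int.floordiv_eq_ediv_of_pos (by norm_num)]; omega]
    rw [pvBxor_zero_left]
  -- ---- B side ----
  have hB : solutionc_alt s L = pvXF (m + 1) (fun k => L * 2 * (k : Int) + s) := by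
    rw [pvBalt s L (2 * m + 1) rfl (by omega)]
    rw [pvXF_evenodd']
    have hEv : pvXF (m + 1) (fun j => pvXR (s + ((2 * j : Nat) : Int) * L) (2 * m + 1 - 2 * j))
        = PySem.Int.bxor (pvXF (m + 1) (fun k => L * 2 * (k : Int) + s))
            (pvXF (m + 1) (fun j => pvP (m - j))) := by
      rw [← pvXF_split]
      apply pvXF_congr
      intro j hj
      have hc : 2 * m + 1 - 2 * j = (2 * (m - j)) + 1 := by omega
      rw [hc, pvXR_cons]
      congr 1
      · simp only [hLdef]; push_cast; ring
      · rw [pvXR_pairs _ _ (by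
          have hd : s + ((2 * j : Nat) : Int) * L + 1 = (s + 1) + 2 * ((j : Int) * L) := by
            simp only [hLdef]; push_cast; ring
          rw [hd, pvParAdd]; omega)]
    have hOd : pvXF m (fun j => pvXR (s + ((2 * j + 1 : Nat) : Int) * L) (2 * m + 1 - (2 * j + 1)))
        = pvXF m (fun j => pvP (m - j)) := by
      apply pvXF_congr
      intro j hj
      have hc : 2 * m + 1 - (2 * j + 1) = 2 * (m - j) := by omega
      rw [hc]
      apply pvXR_pairs
      have hd : s + ((2 * j + 1 : Nat) : Int) * L = (s + 1) + 2 * ((j : Int) * L + (m : Int)) := by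
        simp only [hLdef]; push_cast; ring
      rw [hd, pvParAdd]; omega
    rw [hEv, hOd]
    have hrev1 : pvXF (m + 1) (fun j => pvP (m - j)) = PySem.Int.bxor (pvXF m pvP) (pvP m) := by
      have h1 : pvXF (m + 1) (fun j => pvP (m - j)) = pvXF (m + 1) pvP := by
        have := pvXF_rev (m + 1) pvP
        rw [← this]
        apply pvXF_congr
        intro j hj
        congr 1 <;> omega
      rw [h1, pvXF_succ]
    rw [hrev1, pvPfold_shift]
    rw [pvBxor_assoc, PySem.Int.bxor_self, PySem.Int.bxor_zero]
  rw [hA, hB]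

-- ===== VERDICT (by name: the statement is the Claim_ definition above) =====
theorem solutionc_spec : Claim_unchanged_solutionc := by
  intro s L _ hD
  by_cases hL : L ≤ 0
  · rw [pvA_empty s L hL]
    unfold solutionc_alt
    rw [if_pos hL, if_neg (by unfold D_solutionc at hD; tauto)]
  · push_neg at hL
    obtain ⟨n, hn, hn0⟩ : ∃ n : Nat, L = ((n : Nat) : Int) ∧ 0 < n := ⟨L.toNat, by omega, by omega⟩
    rcases Nat.mod_two_eq_zero_or_one n with he | he
    · obtain ⟨m, hm⟩ : ∃ m, n = 2 * m := ⟨n / 2, by omega⟩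
      have hm0 : 0 < m := by omega
      rcases Int.emod_two_eq_zero_or_one s with hs | hs
      · subst hn hm; exact pvCaseEE s m hm0 hs
      · subst hn hm; exact pvCaseOE s m hm0 hs
    · obtain ⟨m, hm⟩ : ∃ m, n = 2 * m + 1 := ⟨n / 2, by omega⟩
      rcases Int.emod_two_eq_zero_or_one s with hs | hs
      · subst hn hm; exact pvCaseEO s m hs
      · subst hn hm; exact pvCaseOO s m hs

theorem solutionc_changed : Claim_changed_solutionc := by
  unfold Claim_changed_solutionc; decide

theorem solutionc_tight : Claim_exact_solutionc := by
  intro s L _ hD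
  obtain ⟨hL0, hs, h4⟩ := hD
  rw [pvA_empty s L hL0]
  unfold solutionc_alt
  rw [if_pos hL0, if_pos (by exact ⟨hs, h4⟩)]
  decide
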